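-- pv_equiv track=rewrite | github.com/MrBrantCode/unitest_baseline | mut_generate/mist_train_cf/cf_18507/solution.py | categorize_names
-- ===== SOURCE A (Python) =====
-- def categorize_names(names):
--     """
--     This function groups a list of names into categories based on the length of the names.
--
--     Args:
--     names (list): A list of names
--
--     Returns:
--     dict: A dictionary with the categorized and sorted names
--     """
--     categories = {i: [] for i in range(1, 6)}
--
--     for name in names:
--         length = len(name)
--         if 1 <= length <= 5:
--             categories[length].append(name)
--
--     for key in categories:
--         categories[key].sort(reverse=True)
--
--     return categories
-- ===== SOURCE B (Python) =====
-- def categorize_names(names):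
--     return {i: sorted([n for n in names if len(n) == i], reverse=True)
--             for i in range(1, 6)}
-- ===== Notes on version B (the rewrite author's own statement) =====
-- stated objective: idiomatic
-- what changed: Replaces the bucket-distribute loop plus per-bucket in-place sorts with a single dict comprehension that, for each length 1..5, filters the name list and sorts that filtered sublist descending.
import Mathlib
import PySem

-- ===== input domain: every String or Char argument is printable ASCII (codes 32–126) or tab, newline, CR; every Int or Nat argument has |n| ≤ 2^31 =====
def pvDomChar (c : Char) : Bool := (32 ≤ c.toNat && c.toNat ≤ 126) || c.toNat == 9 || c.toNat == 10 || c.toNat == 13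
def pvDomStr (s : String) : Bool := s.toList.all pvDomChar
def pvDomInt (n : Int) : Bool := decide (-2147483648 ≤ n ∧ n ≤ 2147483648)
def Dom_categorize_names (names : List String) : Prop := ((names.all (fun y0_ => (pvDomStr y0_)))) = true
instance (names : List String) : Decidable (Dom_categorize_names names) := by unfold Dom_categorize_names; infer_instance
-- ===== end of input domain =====

-- B replaces A's distribute-then-sort loops by a dict comprehension that filters the
-- list once per length 1..5 and sorts each filtered sublist descending (idiomatic; same cost).

-- ===== PORT A =====
-- one loop iteration of A's distribution loop (the body of 'for name in names')
def pvBucketStep (d : PySem.Dict Int (List String)) (name : String) : PySem.Dict Int (List String) :=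
  let length := PySem.Str.len name
  if 1 ≤ length ∧ length ≤ 5 then d.modify length [] (fun l => l ++ [name]) else d

def categorize_names (names : List String) : List (Int × List String) :=
  let categories := (PySem.List.pyRange 1 6 1).foldl
      (fun d i => d.insert i ([] : List String)) PySem.Dict.empty
  let categories := names.foldl pvBucketStep categories
  let categories := categories.keys.foldl
      (fun d key => d.modify key [] (fun l => PySem.List.sorted l (fun x => x) true)) categories
  categories.items

-- ===== PORT B =====
def categorize_names_alt (names : List String) : List (Int × List String) :=
  ((PySem.List.pyRange 1 6 1).foldl
    (fun d i => d.insert i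
      (PySem.List.sorted (names.filter (fun n => PySem.Str.len n == i)) (fun x => x) true))
    PySem.Dict.empty).items

-- ===== PRECONDITION & SPEC =====
def Spec_categorize_names (names : List String) (out : List (Int × List String)) : Prop := out = categorize_names_alt names
instance (names : List String) (out : List (Int × List String)) : Decidable (Spec_categorize_names names out) := by unfold Spec_categorize_names; infer_instance

-- ===== CLAIM (what is proved, stated in full; the proofs are below) =====
def Claim_equal_categorize_names : Prop := ∀ (names : List String), Dom_categorize_names names → Spec_categorize_names names (categorize_names names)

-- ===== LEMMAS AND PROOFS =====

lemma foldA_getD (names : List String) : ∀ (d : PySem.Dict Int (List String)) (c : Int),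
    1 ≤ c → c ≤ 5 →
    (names.foldl pvBucketStep d).getD c []
      = d.getD c [] ++ names.filter (fun n => PySem.Str.len n == c) := by
  induction names with
  | nil => intro d c _ _; simp
  | cons n ns ih =>
    intro d c h1 h5
    simp only [List.foldl_cons, List.filter_cons]
    by_cases h : 1 ≤ PySem.Str.len n ∧ PySem.Str.len n ≤ 5
    · have hs : pvBucketStep d n = d.modify (PySem.Str.len n) [] (fun l => l ++ [n]) := by
        simp only [pvBucketStep]; rw [if_pos h]
      rw [hs, ih _ c h1 h5, PySem.Dict.getD_modify]
      by_cases hc : c = PySem.Str.len n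
      · subst hc
        rw [if_pos rfl, if_pos (beq_self_eq_true _)]
        rw [List.append_assoc, List.singleton_append]
      · have hb : (PySem.Str.len n == c) = false := by
          rw [beq_eq_false_iff_ne]; exact fun e => hc e.symm
        rw [if_neg hc, hb]; simp
    · have hne : (PySem.Str.len n == c) = false := by
        rw [beq_eq_false_iff_ne]; intro e; exact h ⟨e ▸ h1, e ▸ h5⟩
      have hs : pvBucketStep d n = d := by simp only [pvBucketStep]; rw [if_neg h]
      rw [hs, ih _ c h1 h5, hne]; simp

lemma foldA_keys (names : List String) : ∀ (d : PySem.Dict Int (List String)),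
    d.keys = [1, 2, 3, 4, 5] →
    (names.foldl pvBucketStep d).keys = [1, 2, 3, 4, 5] := by
  induction names with
  | nil => intro d hd; simpa using hd
  | cons n ns ih =>
    intro d hd
    simp only [List.foldl_cons]
    by_cases h : 1 ≤ PySem.Str.len n ∧ PySem.Str.len n ≤ 5
    · have hs : pvBucketStep d n = d.modify (PySem.Str.len n) [] (fun l => l ++ [n]) := by
        simp only [pvBucketStep]; rw [if_pos h]
      have hc : d.contains (PySem.Str.len n) = true := by
        rw [PySem.Dict.contains_iff_mem_keys, hd]
        simp only [List.mem_cons, List.not_mem_nil, or_false]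
        omega
      apply ih
      rw [hs, PySem.Dict.keys_modify, PySem.Dict.keys_insert_of_contains (h := hc), hd]
    · have hs : pvBucketStep d n = d := by simp only [pvBucketStep]; rw [if_neg h]
      rw [hs]; exact ih d hd

lemma keys_modify_keep (d : PySem.Dict Int (List String)) (k : Int) (f : List String → List String)
    (hd : d.keys = [1, 2, 3, 4, 5]) (hk : k ∈ ([1, 2, 3, 4, 5] : List Int)) :
    (d.modify k [] f).keys = [1, 2, 3, 4, 5] := by
  have hc : d.contains k = true := by rw [PySem.Dict.contains_iff_mem_keys, hd]; exact hk
  rw [PySem.Dict.keys_modify, PySem.Dict.keys_insert_of_contains (h := hc)]; exact hd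

lemma B_items (names : List String) :
    categorize_names_alt names
      = List.map (fun i =>
          (i, PySem.List.sorted (names.filter (fun n => PySem.Str.len n == i)) (fun x => x) true))
          ([1, 2, 3, 4, 5] : List Int) := by
  unfold categorize_names_alt
  rw [show PySem.List.pyRange 1 6 1 = [1, 2, 3, 4, 5] from by decide]
  have h := PySem.Dict.items_foldl_insert_fresh (l := ([1,2,3,4,5] : List Int))
      (k := fun i => (i : Int))
      (v := fun i => PySem.List.sorted (names.filter (fun n => PySem.Str.len n == i)) (fun x => x) true)
      (d := PySem.Dict.empty) (by intro a _; simp) (by decide)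
  simpa using h

lemma main_eq (names : List String) : categorize_names names = categorize_names_alt names := by
  rw [B_items]
  unfold categorize_names
  rw [show PySem.List.pyRange 1 6 1 = [1, 2, 3, 4, 5] from by decide]
  simp only [List.foldl_cons, List.foldl_nil]
  set d0 : PySem.Dict Int (List String) :=
    ((((PySem.Dict.empty.insert (1 : Int) ([] : List String)).insert 2 []).insert 3 []).insert 4 []).insert 5 []
    with hd0
  set d1 := names.foldl pvBucketStep d0 with hd1
  have hk1 : d1.keys = [1, 2, 3, 4, 5] := foldA_keys names d0 (by decide)
  rw [hk1]
  simp only [List.foldl_cons, List.foldl_nil]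
  have hk2 := keys_modify_keep d1 1 (fun l => PySem.List.sorted l (fun x => x) true) hk1 (by decide)
  have hk3 := keys_modify_keep _ 2 (fun l => PySem.List.sorted l (fun x => x) true) hk2 (by decide)
  have hk4 := keys_modify_keep _ 3 (fun l => PySem.List.sorted l (fun x => x) true) hk3 (by decide)
  have hk5 := keys_modify_keep _ 4 (fun l => PySem.List.sorted l (fun x => x) true) hk4 (by decide)
  have hk6 := keys_modify_keep _ 5 (fun l => PySem.List.sorted l (fun x => x) true) hk5 (by decide)
  have hg : ∀ c : Int, 1 ≤ c → c ≤ 5 →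
      d1.getD c [] = names.filter (fun n => PySem.Str.len n == c) := by
    intro c h1 h5
    have h0 : d0.getD c [] = [] := by
      rw [hd0]; simp only [PySem.Dict.getD_insert, PySem.Dict.getD_empty]
      split_ifs <;> rfl
    rw [hd1, foldA_getD names d0 c h1 h5, h0, List.nil_append]
  rw [PySem.Dict.items_eq_map_keys _ (by rw [hk6]; decide) ([] : List String), hk6]
  simp only [List.map_cons, List.map_nil, PySem.Dict.getD_modify]
  norm_num
  rw [hg 1 (by norm_num) (by norm_num), hg 2 (by norm_num) (by norm_num),
    hg 3 (by norm_num) (by norm_num), hg 4 (by norm_num) (by norm_num),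
    hg 5 (by norm_num) (by norm_num)]
  simp [PySem.Str.len_eq]

-- ===== VERDICT (by name: the statement is the Claim_ definition above) =====
theorem categorize_names_spec : Claim_equal_categorize_names := by
  intro names _
  unfold Spec_categorize_names
  exact main_eq names
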